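-- pv_equiv track=rewrite | github.com/superstealthysheep/crawler | crawler/owoifier.py | owoify
-- ===== SOURCE A (Python) =====
-- def owoify(input_string):
--     vowels = ["a", "e", "i", "o", "u"]
--     output_string = ""
--     for letter in input_string:
--         if letter.lower() in vowels:
--             if letter == letter.upper():
--                 output_string += (letter + "w" + letter.lower()) #So O --> Owo, not OwO or owo
--             else:
--                 output_string += (letter + "w" + letter) #normal case
--         else:
--             output_string += letter
--     return(output_string)
-- ===== SOURCE B (Python) =====
-- def owoify(input_string):
--     # Ten staged whole-string replace passes instead of a per-character branching loop.
--     # Lowercase vowels are replaced first, so the lowercase copies inserted by the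
--     # uppercase passes (V -> V + "w" + v) are never reprocessed; no pass introduces
--     # an uppercase vowel, so the ordering makes the stages independent.
--     s = input_string
--     for v in "aeiou":
--         s = s.replace(v, v + "w" + v)
--     for v in "AEIOU":
--         s = s.replace(v, v + "w" + v.lower())
--     return s
-- ===== Notes on version B (the rewrite author's own statement) =====
-- stated objective: alternative
-- what changed: Replaces A's single per-character loop with nested vowel/case conditionals by ten staged whole-string str.replace passes (lowercase vowels first so the lowercase copies inserted by the uppercase passes are never reprocessed, and no pass introduces an uppercase vowel).
import Mathlib
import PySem

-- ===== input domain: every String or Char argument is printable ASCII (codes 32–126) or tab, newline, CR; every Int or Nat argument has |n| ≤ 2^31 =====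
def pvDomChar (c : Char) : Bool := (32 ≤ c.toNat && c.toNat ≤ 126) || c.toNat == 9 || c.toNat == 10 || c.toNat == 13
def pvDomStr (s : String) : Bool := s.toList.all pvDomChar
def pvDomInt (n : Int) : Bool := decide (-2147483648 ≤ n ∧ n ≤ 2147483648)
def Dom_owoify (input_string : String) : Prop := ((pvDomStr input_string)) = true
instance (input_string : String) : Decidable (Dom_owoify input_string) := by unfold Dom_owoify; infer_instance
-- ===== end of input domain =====

-- B replaces A's per-character branching loop with ten staged whole-string
-- str.replace passes (lowercase vowels first, then uppercase); objective: alternative.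


-- ===== PORT A =====
-- A's loop body: vowel test on letter.lower(), then the upper-case test, appending
def owoStep (out : List Char) (letter : Char) : List Char :=
  if (['a', 'e', 'i', 'o', 'u'] : List Char).contains (PySem.Chars.lowerChar letter) then
    if letter == PySem.Chars.upperChar letter then
      out ++ [letter, 'w', PySem.Chars.lowerChar letter]
    else
      out ++ [letter, 'w', letter]
  else
    out ++ [letter]

def owoify (input_string : String) : String :=
  String.ofList (input_string.toList.foldl owoStep [])

-- ===== PORT B =====
-- Source B: s = input; for v in "aeiou": s = s.replace(v, v+"w"+v);
--       for v in "AEIOU": s = s.replace(v, v+"w"+v.lower()); return s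
def owoify_alt (input_string : String) : String :=
  let s := ("aeiou".toList).foldl
    (fun s v => PySem.Str.replace s (String.ofList [v]) (String.ofList [v, 'w', v])) input_string
  ("AEIOU".toList).foldl
    (fun s v => PySem.Str.replace s (String.ofList [v]) (String.ofList [v, 'w', PySem.Chars.lowerChar v])) s

-- ===== PRECONDITION & SPEC =====
def Spec_owoify (input_string : String) (out : String) : Prop := out = owoify_alt input_string
instance (input_string : String) (out : String) : Decidable (Spec_owoify input_string out) := by unfold Spec_owoify; infer_instance

-- ===== CLAIM (what is proved, stated in full; the proofs are below) =====
def Claim_equal_owoify : Prop := ∀ (input_string : String), Dom_owoify input_string → Spec_owoify input_string (owoify input_string)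

-- ===== LEMMAS AND PROOFS =====

-- the replacement A's loop body appends for one character
def owoPiece (letter : Char) : List Char :=
  if (['a', 'e', 'i', 'o', 'u'] : List Char).contains (PySem.Chars.lowerChar letter) then
    if letter == PySem.Chars.upperChar letter then
      [letter, 'w', PySem.Chars.lowerChar letter]
    else
      [letter, 'w', letter]
  else
    [letter]

theorem owoStep_piece (out : List Char) (ch : Char) :
    owoStep out ch = out ++ owoPiece ch := by
  unfold owoStep owoPiece
  split_ifs <;> rfl

theorem foldl_owoStep (l : List Char) (acc : List Char) :
    l.foldl owoStep acc = acc ++ l.flatMap owoPiece := by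
  induction l generalizing acc with
  | nil => simp
  | cons c t ih => simp [List.foldl_cons, owoStep_piece, ih]

-- a char whose lowercase is a vowel is one of the ten vowel characters
theorem lower_mem_vowels {c : Char}
    (h : PySem.Chars.lowerChar c ∈ (['a', 'e', 'i', 'o', 'u'] : List Char)) :
    c ∈ (['a', 'e', 'i', 'o', 'u', 'A', 'E', 'I', 'O', 'U'] : List Char) := by
  revert h
  simp only [PySem.Chars.lowerChar]
  split <;> rename_i hc
  · simp only [PySem.Chars.isupper, Bool.and_eq_true, decide_eq_true_eq] at hc
    obtain ⟨hA, hZ⟩ := hc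
    have hA' : 65 ≤ c.toNat := hA
    have hZ' : c.toNat ≤ 90 := hZ
    have hv : Nat.isValidChar (c.toNat + 32) := Or.inl (by omega)
    have ht : (Char.ofNat (c.toNat + 32)).toNat = c.toNat + 32 := by
      simp [Char.ofNat, hv]
    intro h
    simp only [List.mem_cons, List.not_mem_nil, or_false] at h ⊢
    have hc : c = Char.ofNat c.toNat := (Char.ofNat_toNat c).symm
    rcases h with h | h | h | h | h
    · have h2 := congrArg Char.toNat h
      rw [ht, show ('a' : Char).toNat = 97 by decide] at h2
      have hn : c.toNat = 65 := by omega
      rw [hc, hn]; decide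
    · have h2 := congrArg Char.toNat h
      rw [ht, show ('e' : Char).toNat = 101 by decide] at h2
      have hn : c.toNat = 69 := by omega
      rw [hc, hn]; decide
    · have h2 := congrArg Char.toNat h
      rw [ht, show ('i' : Char).toNat = 105 by decide] at h2
      have hn : c.toNat = 73 := by omega
      rw [hc, hn]; decide
    · have h2 := congrArg Char.toNat h
      rw [ht, show ('o' : Char).toNat = 111 by decide] at h2
      have hn : c.toNat = 79 := by omega
      rw [hc, hn]; decide
    · have h2 := congrArg Char.toNat h
      rw [ht, show ('u' : Char).toNat = 117 by decide] at h2
      have hn : c.toNat = 85 := by omega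
      rw [hc, hn]; decide
  · intro h
    simp only [List.mem_cons, List.not_mem_nil, or_false] at h ⊢
    tauto

-- single-character replace is a flatMap over the characters
theorem replace_go_single (v : Char) (new : List Char) :
    ∀ (l : List Char) (fuel : Nat) (acc : List Char), l.length ≤ fuel →
      PySem.Chars.replace.go [v] new fuel l acc =
        acc.reverse ++ l.flatMap (fun c => if c = v then new else [c]) := by
  intro l
  induction l with
  | nil =>
    intro fuel acc _
    cases fuel <;> simp [PySem.Chars.replace.go]
  | cons c t ih =>
    intro fuel acc h
    cases fuel with
    | zero => simp at h
    | succ n =>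
      by_cases hc : c = v
      · subst hc
        have hgo : PySem.Chars.replace.go [c] new (n + 1) (c :: t) acc =
            PySem.Chars.replace.go [c] new n t (new.reverse ++ acc) := by
          rw [PySem.Chars.replace.go.eq_def]
          simp [List.isPrefixOf]
        rw [hgo, ih n _ (Nat.le_of_succ_le_succ h)]
        simp
      · have hgo : PySem.Chars.replace.go [v] new (n + 1) (c :: t) acc =
            PySem.Chars.replace.go [v] new n t (c :: acc) := by
          rw [PySem.Chars.replace.go.eq_def]
          simp [List.isPrefixOf, Ne.symm hc]
        rw [hgo, ih n _ (Nat.le_of_succ_le_succ h)]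
        simp [hc]

def rfun (v : Char) (new : List Char) (c : Char) : List Char := if c = v then new else [c]

theorem replace_single (s : List Char) (v : Char) (new : List Char) :
    PySem.Chars.replace s [v] new = s.flatMap (rfun v new) := by
  rw [PySem.Chars.replace]
  rw [if_neg (by simp : ¬ (([v] : List Char).isEmpty = true))]
  exact replace_go_single v new s s.length [] (le_refl _)

-- the composite of the ten staged replaces, per character
theorem owoPiece_staged (c : Char) :
    ((((((((((rfun 'a' ['a','w','a'] c).flatMap (rfun 'e' ['e','w','e'])).flatMap
      (rfun 'i' ['i','w','i'])).flatMap (rfun 'o' ['o','w','o'])).flatMap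
      (rfun 'u' ['u','w','u'])).flatMap (rfun 'A' ['A','w','a'])).flatMap
      (rfun 'E' ['E','w','e'])).flatMap (rfun 'I' ['I','w','i'])).flatMap
      (rfun 'O' ['O','w','o'])).flatMap (rfun 'U' ['U','w','u'])) = owoPiece c := by
  by_cases hm : c ∈ (['a', 'e', 'i', 'o', 'u', 'A', 'E', 'I', 'O', 'U'] : List Char)
  · fin_cases hm <;> decide
  · have hv : PySem.Chars.lowerChar c ∉ (['a', 'e', 'i', 'o', 'u'] : List Char) :=
      fun h => hm (lower_mem_vowels h)
    have hcont : (['a', 'e', 'i', 'o', 'u'] : List Char).contains (PySem.Chars.lowerChar c) = false := by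
      simpa using hv
    simp only [List.mem_cons, List.not_mem_nil, or_false, not_or] at hm
    obtain ⟨h1, h2, h3, h4, h5, h6, h7, h8, h9, h10⟩ := hm
    have hR : owoPiece c = [c] := by
      unfold owoPiece
      rw [hcont]
      simp
    rw [hR]
    simp [rfun, h1, h2, h3, h4, h5, h6, h7, h8, h9, h10]

-- the full ten-stage pipeline as one function on character lists
def pipeline (l : List Char) : List Char :=
  ((((((((((l.flatMap (rfun 'a' ['a','w','a'])).flatMap (rfun 'e' ['e','w','e'])).flatMap
    (rfun 'i' ['i','w','i'])).flatMap (rfun 'o' ['o','w','o'])).flatMap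
    (rfun 'u' ['u','w','u'])).flatMap (rfun 'A' ['A','w','a'])).flatMap
    (rfun 'E' ['E','w','e'])).flatMap (rfun 'I' ['I','w','i'])).flatMap
    (rfun 'O' ['O','w','o'])).flatMap (rfun 'U' ['U','w','u']))

theorem pipeline_append (x y : List Char) : pipeline (x ++ y) = pipeline x ++ pipeline y := by
  simp [pipeline]

theorem pipeline_single (c : Char) : pipeline [c] = owoPiece c := by
  simp only [pipeline, List.flatMap_cons, List.flatMap_nil, List.append_nil]
  exact owoPiece_staged c

theorem pipeline_eq (l : List Char) : pipeline l = l.flatMap owoPiece := by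
  induction l with
  | nil => simp [pipeline]
  | cons c t ih =>
    rw [show c :: t = [c] ++ t from rfl, pipeline_append, pipeline_single, ih]
    simp

-- ===== VERDICT (by name: the statement is the Claim_ definition above) =====
theorem owoify_spec : Claim_equal_owoify := by
  intro s _
  unfold Spec_owoify
  have halt : (owoify_alt s).toList = s.toList.flatMap owoPiece := by
    unfold owoify_alt
    simp only [show ("aeiou".toList) = (['a','e','i','o','u'] : List Char) from rfl,
      show ("AEIOU".toList) = (['A','E','I','O','U'] : List Char) from rfl,
      List.foldl_cons, List.foldl_nil, PySem.Str.toList_replace, String.toList_ofList]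
    simp only [replace_single]
    exact pipeline_eq s.toList
  calc owoify s = String.ofList (s.toList.flatMap owoPiece) := by
        unfold owoify; rw [foldl_owoStep]; simp
    _ = String.ofList ((owoify_alt s).toList) := by rw [halt]
    _ = owoify_alt s := by simp
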